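-- pv_equiv track=rewrite | github.com/ilitygergo/thesis | Common/functions.py | countf
-- ===== SOURCE A (Python) =====
-- def countf(img, row, col):
--     if img[row][col + 1] < img[row][col] and (img[row][col + 1] < img[row - 1][col + 1] or img[row][col + 1] < img[row - 1][col]):
--         f1 = -1
--     elif img[row][col + 1] > img[row - 1][col] and img[row - 1][col] < img[row][col]:
--         f1 = 1
--     else:
--         f1 = 0
--     if img[row - 1][col] < img[row][col] and (img[row - 1][col] < img[row - 1][col - 1] or img[row - 1][col] < img[row][col - 1]):
--         f3 = -1
--     elif img[row - 1][col] > img[row][col - 1] and img[row][col - 1] < img[row][col]: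
--         f3 = 1
--     else:
--         f3 = 0
--     if img[row][col - 1] < img[row][col] and (img[row][col - 1] < img[row + 1][col - 1] or img[row][col - 1] < img[row + 1][col]):
--         f5 = -1
--     elif img[row][col - 1] > img[row + 1][col] and img[row + 1][col] < img[row][col]:
--         f5 = 1
--     else:
--         f5 = 0
--     if img[row + 1][col] < img[row][col] and (img[row + 1][col] < img[row + 1][col + 1] or img[row + 1][col] < img[row][col + 1]):
--         f7 = -1
--     elif img[row + 1][col] > img[row][col + 1] and img[row][col + 1] < img[row][col]:
--         f7 = 1
--     else:
--         f7 = 0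
--     if img[row - 1][col + 1] > img[row - 1][col] and img[row - 1][col] < img[row][col]:
--         f2 = 1
--     else:
--         f2 = 0
--     if img[row - 1][col - 1] > img[row][col - 1] and img[row][col - 1] < img[row][col]:
--         f4 = 1
--     else:
--         f4 = 0
--     if img[row + 1][col - 1] > img[row + 1][col] and img[row + 1][col] < img[row][col]:
--         f6 = 1
--     else:
--         f6 = 0
--     if img[row + 1][col + 1] > img[row][col + 1] and img[row][col + 1] < img[row][col]:
--         f8 = 1
--     else:
--         f8 = 0
--     X = [f1, f2, f3, f4, f5, f6, f7, f8, f1]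
--     last_sign = 0
--     sign_changes = 0
--
--     for x in X:
--         if x == 0:
--             continue
--         elif x == 1:
--             if last_sign == -1:
--                 sign_changes += 1
--         last_sign = x
--
--     return sign_changes
-- ===== SOURCE B (Python) =====
-- def countf(img, row, col):
--     # Sum-of-indicators formulation: a sign change is counted once per gradient
--     # "source" (a cardinal neighbor flagged -1) whose next nonzero flag ahead is +1.
--     c = img[row][col]
--     e, n, w, s = img[row][col + 1], img[row - 1][col], img[row][col - 1], img[row + 1][col]
--     ne, nw, sw, se = img[row - 1][col + 1], img[row - 1][col - 1], img[row + 1][col - 1], img[row + 1][col + 1]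
--
--     def card(a, d, b):
--         # flag of a cardinal neighbor a (d = CCW-next diagonal, b = CCW-next cardinal)
--         if a < c and (a < d or a < b):
--             return -1
--         if a > b and b < c:
--             return 1
--         return 0
--
--     def diag(d, b):
--         # flag of a diagonal neighbor d (b = CCW-next cardinal)
--         return 1 if d > b and b < c else 0
--
--     ring = [card(e, ne, n), diag(ne, n), card(n, nw, w), diag(nw, w),
--             card(w, sw, s), diag(sw, s), card(s, se, e), diag(se, e)]
--     cyc = ring + [ring[0]]
--
--     def first_is_plus(seq):
--         for x in seq:
--             if x != 0:
--                 return x == 1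
--         return False
--
--     return sum(1 for i in (0, 2, 4, 6)
--                if cyc[i] == -1 and first_is_plus(cyc[i + 1:]))
-- ===== Notes on version B (the rewrite author's own statement) =====
-- stated objective: alternative
-- what changed: Replaces A's eight copy-pasted flag blocks by two shared rule helpers (cardinal/diagonal) applied around the named neighbor ring, and replaces A's stateful last_sign scan by a sum of per-source indicators: for each cardinal flagged -1, a forward search decides whether the first nonzero flag after it is +1.
import Mathlib
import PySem

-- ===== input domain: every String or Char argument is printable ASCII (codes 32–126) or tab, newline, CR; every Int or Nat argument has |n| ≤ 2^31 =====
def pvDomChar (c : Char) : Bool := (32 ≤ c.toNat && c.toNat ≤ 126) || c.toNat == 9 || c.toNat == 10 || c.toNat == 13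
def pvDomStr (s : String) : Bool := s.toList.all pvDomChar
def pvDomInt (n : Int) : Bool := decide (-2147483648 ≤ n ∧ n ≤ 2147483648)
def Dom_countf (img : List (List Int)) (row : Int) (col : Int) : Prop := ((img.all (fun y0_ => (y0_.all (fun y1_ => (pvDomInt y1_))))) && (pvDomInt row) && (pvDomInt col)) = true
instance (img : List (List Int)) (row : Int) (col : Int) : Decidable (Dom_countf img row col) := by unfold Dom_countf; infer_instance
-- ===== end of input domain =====

-- B replaces A's eight inline flag blocks by two shared rule helpers over the neighbor
-- ring and counts sign changes as a sum of per-source indicators (forward search for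
-- the next nonzero flag) instead of A's stateful last_sign scan.

-- shared access helper: img[r][c]; the default is never reached under Pre_countf
def pvAt (img : List (List Int)) (r c : Int) : Int :=
  PySem.List.pyGetD (PySem.List.pyGetD img r []) c 0

-- ===== PORT A =====
def countf (img : List (List Int)) (row : Int) (col : Int) : Int :=
  let f1 : Int :=
    if pvAt img row (col+1) < pvAt img row col ∧ (pvAt img row (col+1) < pvAt img (row-1) (col+1) ∨ pvAt img row (col+1) < pvAt img (row-1) col) then -1
    else if pvAt img row (col+1) > pvAt img (row-1) col ∧ pvAt img (row-1) col < pvAt img row col then 1 else 0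
  let f3 : Int :=
    if pvAt img (row-1) col < pvAt img row col ∧ (pvAt img (row-1) col < pvAt img (row-1) (col-1) ∨ pvAt img (row-1) col < pvAt img row (col-1)) then -1
    else if pvAt img (row-1) col > pvAt img row (col-1) ∧ pvAt img row (col-1) < pvAt img row col then 1 else 0
  let f5 : Int :=
    if pvAt img row (col-1) < pvAt img row col ∧ (pvAt img row (col-1) < pvAt img (row+1) (col-1) ∨ pvAt img row (col-1) < pvAt img (row+1) col) then -1
    else if pvAt img row (col-1) > pvAt img (row+1) col ∧ pvAt img (row+1) col < pvAt img row col then 1 else 0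
  let f7 : Int :=
    if pvAt img (row+1) col < pvAt img row col ∧ (pvAt img (row+1) col < pvAt img (row+1) (col+1) ∨ pvAt img (row+1) col < pvAt img row (col+1)) then -1
    else if pvAt img (row+1) col > pvAt img row (col+1) ∧ pvAt img row (col+1) < pvAt img row col then 1 else 0
  let f2 : Int := if pvAt img (row-1) (col+1) > pvAt img (row-1) col ∧ pvAt img (row-1) col < pvAt img row col then 1 else 0
  let f4 : Int := if pvAt img (row-1) (col-1) > pvAt img row (col-1) ∧ pvAt img row (col-1) < pvAt img row col then 1 else 0
  let f6 : Int := if pvAt img (row+1) (col-1) > pvAt img (row+1) col ∧ pvAt img (row+1) col < pvAt img row col then 1 else 0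
  let f8 : Int := if pvAt img (row+1) (col+1) > pvAt img row (col+1) ∧ pvAt img row (col+1) < pvAt img row col then 1 else 0
  let X : List Int := [f1, f2, f3, f4, f5, f6, f7, f8, f1]
  (X.foldl (fun (st : Int × Int) x =>
      if x = 0 then st
      else (x, if x = 1 ∧ st.1 = -1 then st.2 + 1 else st.2)) (0, 0)).2

-- ===== PORT B =====
-- flag of a cardinal neighbor a (d = CCW-next diagonal, b = CCW-next cardinal), center c
def bCard (c a d b : Int) : Int :=
  if a < c ∧ (a < d ∨ a < b) then -1 else if a > b ∧ b < c then 1 else 0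
-- flag of a diagonal neighbor d (b = CCW-next cardinal), center c
def bDiag (c d b : Int) : Int := if d > b ∧ b < c then 1 else 0
-- first_is_plus: whether the first nonzero entry of seq equals 1
def bFirstIsPlus : List Int → Bool
  | [] => false
  | x :: xs => if x ≠ 0 then x == 1 else bFirstIsPlus xs

def countf_alt (img : List (List Int)) (row : Int) (col : Int) : Int :=
  let c := pvAt img row col
  let e := pvAt img row (col+1)
  let n := pvAt img (row-1) col
  let w := pvAt img row (col-1)
  let s := pvAt img (row+1) col
  let ne := pvAt img (row-1) (col+1)
  let nw := pvAt img (row-1) (col-1)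
  let sw := pvAt img (row+1) (col-1)
  let se := pvAt img (row+1) (col+1)
  let ring : List Int := [bCard c e ne n, bDiag c ne n, bCard c n nw w, bDiag c nw w,
                          bCard c w sw s, bDiag c sw s, bCard c s se e, bDiag c se e]
  let cyc := ring ++ [PySem.List.pyGetD ring 0 0]
  ((([0, 2, 4, 6] : List Int).filter (fun i =>
      PySem.List.pyGetD cyc i 0 == -1 && bFirstIsPlus (PySem.List.slice cyc (some (i+1)) none))).length : Int)

-- ===== PRECONDITION & SPEC =====
-- Pre_ excludes exactly the inputs on which A raises IndexError: some of the nine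
-- accessed cells (after Python's negative-index wraparound) is out of range.
def Pre_countf (img : List (List Int)) (row : Int) (col : Int) : Prop :=
  ∀ dr ∈ ([-1, 0, 1] : List Int), ∀ dc ∈ ([-1, 0, 1] : List Int),
    ((PySem.List.pyGet? img (row + dr)).bind
      (fun rw => PySem.List.pyGet? rw (col + dc))).isSome = true
instance (img : List (List Int)) (row : Int) (col : Int) : Decidable (Pre_countf img row col) := by unfold Pre_countf; infer_instance

def pvWitness_countf : List (List Int) × Int × Int := ([[0, 1, 2], [3, 4, 5], [6, 7, 8]], 1, 1)

def Spec_countf (img : List (List Int)) (row : Int) (col : Int) (out : Int) : Prop := out = countf_alt img row col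
instance (img : List (List Int)) (row : Int) (col : Int) (out : Int) : Decidable (Spec_countf img row col out) := by unfold Spec_countf; infer_instance

-- ===== CLAIM (what is proved, stated in full; the proofs are below) =====
def Claim_equal_countf : Prop := ∀ (img : List (List Int)) (row : Int) (col : Int), Dom_countf img row col → Pre_countf img row col → Spec_countf img row col (countf img row col)

-- ===== LEMMAS AND PROOFS =====

-- each cardinal flag is -1, 0 or 1; each diagonal flag is 0 or 1
theorem bCard_mem (c a d b : Int) : bCard c a d b = -1 ∨ bCard c a d b = 0 ∨ bCard c a d b = 1 := by
  unfold bCard; split_ifs <;> simp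
theorem bDiag_mem (c d b : Int) : bDiag c d b = 0 ∨ bDiag c d b = 1 := by
  unfold bDiag; split_ifs <;> simp

-- the core combinatorial fact, over arbitrary flag values in their ranges:
-- A's stateful skip-zero scan of [f1..f8,f1] equals B's sum of per-source indicators
theorem pvKey (f1 f2 f3 f4 f5 f6 f7 f8 : Int)
    (h1 : f1 = -1 ∨ f1 = 0 ∨ f1 = 1) (h3 : f3 = -1 ∨ f3 = 0 ∨ f3 = 1)
    (h5 : f5 = -1 ∨ f5 = 0 ∨ f5 = 1) (h7 : f7 = -1 ∨ f7 = 0 ∨ f7 = 1)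
    (h2 : f2 = 0 ∨ f2 = 1) (h4 : f4 = 0 ∨ f4 = 1)
    (h6 : f6 = 0 ∨ f6 = 1) (h8 : f8 = 0 ∨ f8 = 1) :
    (([f1, f2, f3, f4, f5, f6, f7, f8, f1] : List Int).foldl (fun (st : Int × Int) x =>
        if x = 0 then st
        else (x, if x = 1 ∧ st.1 = -1 then st.2 + 1 else st.2)) (0, 0)).2
    = ((([0, 2, 4, 6] : List Int).filter (fun i =>
        PySem.List.pyGetD ([f1, f2, f3, f4, f5, f6, f7, f8] ++
          [PySem.List.pyGetD [f1, f2, f3, f4, f5, f6, f7, f8] 0 0]) i 0 == -1 &&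
        bFirstIsPlus (PySem.List.slice ([f1, f2, f3, f4, f5, f6, f7, f8] ++
          [PySem.List.pyGetD [f1, f2, f3, f4, f5, f6, f7, f8] 0 0]) (some (i+1)) none))).length : Int) := by
  rcases h1 with rfl | rfl | rfl <;> rcases h3 with rfl | rfl | rfl <;>
    rcases h5 with rfl | rfl | rfl <;> rcases h7 with rfl | rfl | rfl <;>
    rcases h2 with rfl | rfl <;> rcases h4 with rfl | rfl <;>
    rcases h6 with rfl | rfl <;> rcases h8 with rfl | rfl <;> decide

-- ===== VERDICT (by name: the statement is the Claim_ definition above) =====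
theorem countf_spec : Claim_equal_countf := by
  intro img row col _ _
  unfold Spec_countf
  exact pvKey _ _ _ _ _ _ _ _
    (bCard_mem _ _ _ _) (bCard_mem _ _ _ _) (bCard_mem _ _ _ _) (bCard_mem _ _ _ _)
    (bDiag_mem _ _ _) (bDiag_mem _ _ _) (bDiag_mem _ _ _) (bDiag_mem _ _ _)
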